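-- pv_equiv track=rewrite | github.com/DucHai972/Q_Benchmark | generate_healthcare_multi_hop_relational.py | decode_mcq_answer
-- ===== SOURCE A (Python) =====
-- def decode_mcq_answer(feature, coded_answer, questions_schema):
--     """Decode MCQ answer from coded value to human-readable text."""
--     if feature not in questions_schema:
--         return str(coded_answer)
--
--     question_text = questions_schema[feature]
--
--     if '[MCQ:' not in question_text:
--         return str(coded_answer)
--
--     # Extract MCQ options
--     mcq_part = question_text.split('[MCQ:')[1].split(']')[0]
--     options = {}
--
--     # Parse options like "A. Option1 B. Option2"
--     parts = mcq_part.strip().split(' ')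
--     current_key = None
--     current_value = []
--
--     for part in parts:
--         if part and len(part) > 1 and part[1] == '.':
--             if current_key:
--                 options[current_key] = ' '.join(current_value)
--             current_key = part[0]
--             current_value = [part[2:]] if len(part) > 2 else []
--         else:
--             current_value.append(part)
--
--     if current_key:
--         options[current_key] = ' '.join(current_value)
--
--     return options.get(coded_answer, str(coded_answer))
-- ===== SOURCE B (Python) =====
-- def _split_leading_values(tokens):
--     """Split tokens into (leading non-key tokens, remainder starting at first key token)."""
--     for j, t in enumerate(tokens):
--         if len(t) > 1 and t[1] == '.':
--             return tokens[:j], tokens[j:]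
--     return tokens, []
--
--
-- def decode_mcq_answer(feature, coded_answer, questions_schema):
--     """Decode MCQ answer from coded value to human-readable text."""
--     if feature not in questions_schema:
--         return str(coded_answer)
--
--     question_text = questions_schema[feature]
--
--     if '[MCQ:' not in question_text:
--         return str(coded_answer)
--
--     mcq_part = question_text.split('[MCQ:')[1].split(']')[0]
--     tokens = mcq_part.strip().split(' ')
--
--     options = {}
--     _, rest = _split_leading_values(tokens)
--     while rest:
--         key_tok, rest = rest[0], rest[1:]
--         body, rest = _split_leading_values(rest)
--         pieces = ([key_tok[2:]] if len(key_tok) > 2 else []) + body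
--         options[key_tok[0]] = ' '.join(pieces)
--     return options.get(coded_answer, str(coded_answer))
-- ===== Notes on version B (the rewrite author's own statement) =====
-- stated objective: alternative
-- what changed: A parses the MCQ option list with a single-pass state machine carrying (options, current_key, current_value) accumulators flushed on each new key; B instead repeatedly splits the token list into a key token plus its following value tokens (segment at a time) and builds each option value directly, with no pending-state accumulators.
import Mathlib
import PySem

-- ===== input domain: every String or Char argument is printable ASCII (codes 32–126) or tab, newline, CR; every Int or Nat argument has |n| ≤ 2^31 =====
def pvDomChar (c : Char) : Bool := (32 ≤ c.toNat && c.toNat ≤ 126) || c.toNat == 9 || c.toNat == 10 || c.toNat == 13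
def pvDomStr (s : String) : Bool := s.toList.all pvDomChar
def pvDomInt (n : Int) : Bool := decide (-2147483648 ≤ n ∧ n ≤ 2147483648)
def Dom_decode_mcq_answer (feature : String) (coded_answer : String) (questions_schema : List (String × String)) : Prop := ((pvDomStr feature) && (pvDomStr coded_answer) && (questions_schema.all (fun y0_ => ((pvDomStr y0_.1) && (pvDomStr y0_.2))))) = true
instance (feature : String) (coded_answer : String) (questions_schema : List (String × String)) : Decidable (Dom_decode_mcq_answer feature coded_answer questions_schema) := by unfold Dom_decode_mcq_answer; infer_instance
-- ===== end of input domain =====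

-- B re-decomposes A's one-pass accumulator state machine into an explicit segment-at-a-time
-- scan (split off the leading non-key tokens, then repeatedly consume one key token plus its
-- value tokens); same return value, objective: alternative decomposition (no speed claim).

-- ===== PORT A =====
-- 'part and len(part) > 1 and part[1] == "."'
def pvIsKeyA (t : List Char) : Bool := (!t.isEmpty) && decide (1 < t.length) && (t[1]? == some '.')

-- question_text.split('[MCQ:')[1].split(']')[0], then .strip().split(' ') (tokens as char lists)
def pvTokensA (qt : String) : List (List Char) :=
  let s1 := (PySem.Chars.splitOn qt.toList "[MCQ:".toList).getD 1 []
  let mcq := (PySem.Chars.splitOn s1 "]".toList).getD 0 []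
  PySem.Chars.splitOn (PySem.Chars.strip mcq) " ".toList

-- one iteration of A's for-loop over (options, current_key, current_value)
def pvStepA (st : PySem.Dict (List Char) (List Char) × Option (List Char) × List (List Char))
    (part : List Char) :
    PySem.Dict (List Char) (List Char) × Option (List Char) × List (List Char) :=
  if pvIsKeyA part then
    ((match st.2.1 with
      | some k => st.1.insert k (PySem.Chars.join [' '] st.2.2)
      | none => st.1),
     some [part.headI],
     if 2 < part.length then [part.drop 2] else [])
  else (st.1, st.2.1, st.2.2 ++ [part])

def decode_mcq_answer (feature : String) (coded_answer : String) (questions_schema : List (String × String)) : String :=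
  match PySem.Dict.get? (PySem.Dict.ofList questions_schema) feature with
  | none => coded_answer
  | some question_text =>
    if !(PySem.Str.isIn "[MCQ:" question_text) then coded_answer
    else
      let parts := pvTokensA question_text
      let st := parts.foldl pvStepA (PySem.Dict.empty, none, [])
      let options := match st.2.1 with
        | some k => st.1.insert k (PySem.Chars.join [' '] st.2.2)
        | none => st.1
      String.ofList (PySem.Dict.getD options coded_answer.toList coded_answer.toList)

-- ===== PORT B =====
-- 'len(t) > 1 and t[1] == "."'
def pvIsKeyB (t : List Char) : Bool := decide (1 < t.length) && (t[1]? == some '.')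

-- _split_leading_values: (leading non-key tokens, remainder starting at the first key token)
def pvSpan : List (List Char) → List (List Char) × List (List Char)
  | [] => ([], [])
  | t :: ts =>
    if pvIsKeyB t then ([], t :: ts)
    else
      let p := pvSpan ts
      (t :: p.1, p.2)

theorem pvSpan_snd_length (ts : List (List Char)) : (pvSpan ts).2.length ≤ ts.length := by
  induction ts with
  | nil => exact Nat.le.refl
  | cons t ts ih =>
    simp only [pvSpan]
    split
    · exact Nat.le.refl
    · exact Nat.le_succ_of_le ih

-- B's while-loop: rest starts at a key token (or is empty); consume key + body, insert, recurse
def pvBLoop : List (List Char) → PySem.Dict (List Char) (List Char) → PySem.Dict (List Char) (List Char)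
  | [], d => d
  | t :: ts, d =>
    pvBLoop (pvSpan ts).2
      (d.insert [t.headI]
        (PySem.Chars.join [' '] ((if 2 < t.length then [t.drop 2] else []) ++ (pvSpan ts).1)))
  termination_by ts _ => ts.length
  decreasing_by simp only [List.length_cons]; have := pvSpan_snd_length ts; omega

def pvTokensB (qt : String) : List (List Char) :=
  let s1 := (PySem.Chars.splitOn qt.toList "[MCQ:".toList).getD 1 []
  let mcq := (PySem.Chars.splitOn s1 "]".toList).getD 0 []
  PySem.Chars.splitOn (PySem.Chars.strip mcq) " ".toList

def decode_mcq_answer_alt (feature : String) (coded_answer : String) (questions_schema : List (String × String)) : String :=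
  match PySem.Dict.get? (PySem.Dict.ofList questions_schema) feature with
  | none => coded_answer
  | some question_text =>
    if !(PySem.Str.isIn "[MCQ:" question_text) then coded_answer
    else
      let tokens := pvTokensB question_text
      let options := pvBLoop (pvSpan tokens).2 PySem.Dict.empty
      String.ofList (PySem.Dict.getD options coded_answer.toList coded_answer.toList)

-- ===== PRECONDITION & SPEC =====
def Spec_decode_mcq_answer (feature : String) (coded_answer : String) (questions_schema : List (String × String)) (out : String) : Prop := out = decode_mcq_answer_alt feature coded_answer questions_schema
instance (feature : String) (coded_answer : String) (questions_schema : List (String × String)) (out : String) : Decidable (Spec_decode_mcq_answer feature coded_answer questions_schema out) := by unfold Spec_decode_mcq_answer; infer_instance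

-- ===== CLAIM (what is proved, stated in full; the proofs are below) =====
def Claim_equal_decode_mcq_answer : Prop := ∀ (feature : String) (coded_answer : String) (questions_schema : List (String × String)), Dom_decode_mcq_answer feature coded_answer questions_schema → Spec_decode_mcq_answer feature coded_answer questions_schema (decode_mcq_answer feature coded_answer questions_schema)

-- ===== LEMMAS AND PROOFS =====

theorem pvIsKey_eq (t : List Char) : pvIsKeyA t = pvIsKeyB t := by
  unfold pvIsKeyA pvIsKeyB
  cases t <;> simp

-- A's trailing flush of (options, current_key, current_value)
def pvFinish (st : PySem.Dict (List Char) (List Char) × Option (List Char) × List (List Char)) :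
    PySem.Dict (List Char) (List Char) :=
  match st.2.1 with
  | some k => st.1.insert k (PySem.Chars.join [' '] st.2.2)
  | none => st.1

theorem pvBLoop_nil (d : PySem.Dict (List Char) (List Char)) : pvBLoop [] d = d := by
  rw [pvBLoop.eq_def]

theorem pvBLoop_cons (t : List Char) (ts : List (List Char))
    (d : PySem.Dict (List Char) (List Char)) :
    pvBLoop (t :: ts) d =
      pvBLoop (pvSpan ts).2
        (d.insert [t.headI]
          (PySem.Chars.join [' '] ((if 2 < t.length then [t.drop 2] else []) ++ (pvSpan ts).1))) := by
  rw [pvBLoop.eq_def]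

-- invariant of A's loop once a key is pending
theorem pvLoop_some (ts : List (List Char)) :
    ∀ (k : List Char) (v : List (List Char)) (d : PySem.Dict (List Char) (List Char)),
    pvFinish (ts.foldl pvStepA (d, some k, v)) =
      pvBLoop (pvSpan ts).2 (d.insert k (PySem.Chars.join [' '] (v ++ (pvSpan ts).1))) := by
  induction ts with
  | nil =>
    intro k v d
    simp [pvSpan, pvFinish, pvBLoop_nil]
  | cons t ts ih =>
    intro k v d
    by_cases h : pvIsKeyB t = true
    · have hA : pvIsKeyA t = true := by rw [pvIsKey_eq]; exact h
      have hstep : pvStepA (d, some k, v) t =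
          (d.insert k (PySem.Chars.join [' '] v), some [t.headI],
            if 2 < t.length then [t.drop 2] else []) := by
        simp [pvStepA, hA]
      rw [List.foldl_cons, hstep, ih]
      conv_rhs => rw [pvSpan]
      simp only [h, if_true, pvBLoop_cons, List.append_nil]
    · have hA : pvIsKeyA t = false := by rw [pvIsKey_eq]; exact eq_false_of_ne_true h
      have hstep : pvStepA (d, some k, v) t = (d, some k, v ++ [t]) := by
        simp [pvStepA, hA]
      rw [List.foldl_cons, hstep, ih]
      conv_rhs => rw [pvSpan]
      simp only [eq_false_of_ne_true h, Bool.false_eq_true, if_false, List.append_assoc,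
        List.singleton_append]

-- the skip phase before the first key (current_key = None, value tokens discarded)
theorem pvLoop_none (ts : List (List Char)) :
    ∀ (v : List (List Char)) (d : PySem.Dict (List Char) (List Char)),
    pvFinish (ts.foldl pvStepA (d, none, v)) = pvBLoop (pvSpan ts).2 d := by
  induction ts with
  | nil =>
    intro v d
    simp [pvFinish, pvBLoop_nil, pvSpan]
  | cons t ts ih =>
    intro v d
    by_cases h : pvIsKeyB t = true
    · have hA : pvIsKeyA t = true := by rw [pvIsKey_eq]; exact h
      have hstep : pvStepA (d, none, v) t =
          (d, some [t.headI], if 2 < t.length then [t.drop 2] else []) := by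
        simp [pvStepA, hA]
      rw [List.foldl_cons, hstep, pvLoop_some]
      conv_rhs => rw [pvSpan]
      simp only [h, if_true, pvBLoop_cons]
    · have hA : pvIsKeyA t = false := by rw [pvIsKey_eq]; exact eq_false_of_ne_true h
      have hstep : pvStepA (d, none, v) t = (d, none, v ++ [t]) := by
        simp [pvStepA, hA]
      rw [List.foldl_cons, hstep, ih]
      conv_rhs => rw [pvSpan]
      simp only [eq_false_of_ne_true h, Bool.false_eq_true, if_false]

-- ===== VERDICT (by name: the statement is the Claim_ definition above) =====
theorem decode_mcq_answer_spec : Claim_equal_decode_mcq_answer := by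
  intro feature coded_answer questions_schema _
  unfold Spec_decode_mcq_answer decode_mcq_answer decode_mcq_answer_alt
  cases PySem.Dict.get? (PySem.Dict.ofList questions_schema) feature with
  | none => rfl
  | some question_text =>
    dsimp only
    by_cases hin : (!PySem.Str.isIn "[MCQ:" question_text) = true
    · rw [if_pos hin, if_pos hin]
    · rw [if_neg hin, if_neg hin]
      have h := pvLoop_none (pvTokensA question_text) [] PySem.Dict.empty
      simp only [pvFinish] at h
      have htok : pvTokensB question_text = pvTokensA question_text := by
        unfold pvTokensA pvTokensB
        rfl
      exact congrArg
        (fun d => String.ofList (PySem.Dict.getD d coded_answer.toList coded_answer.toList))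
        (h.trans (congrArg (fun ts => pvBLoop (pvSpan ts).2 PySem.Dict.empty) htok.symm))
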